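-- pv_equiv track=rewrite | github.com/zechuegui/University | AA/1º Trab AA/43017.py | atrDistMatrx
-- ===== SOURCE A (Python) =====
-- def atrDistMatrx(arr): # atributos distintos da matriz
--         valores = {}
--         aux =[]
--
--         for x in range(0, len(arr[0])): # Percorre horizontalmente
--             for y in range(0, len(arr)): #Percorre verticalmente
--                 if arr[y][x] not in aux:
--                     aux.append(arr[y][x]) #Insere os valores
--
--             valores[x]=tuple(aux) # Insere num dicionário tuplos com elementos únicos associados ao index da coluna
--             aux.clear() #Limpa o array para inserirmos a próxima coluna
--
--         return valores #Fazemos um sort para que todos os valores fiquem sempre no mesmo sitio e damos return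
-- ===== SOURCE B (Python) =====
-- def atrDistMatrx(arr):
--     ncols = len(arr[0])
--     state = [([], set()) for _ in range(ncols)]  # per column: (ordered distinct values, seen-set)
--     for row in arr:
--         state = [(c, s) if v in s else (c + [v], s | {v})
--                  for (c, s), v in zip(state, [row[x] for x in range(ncols)])]
--     return {x: tuple(c) for x, (c, s) in enumerate(state)}
-- ===== Notes on version B (the rewrite author's own statement) =====
-- stated objective: alternative
-- what changed: A scans the matrix column by column, rebuilding one dedup list per column with nested index loops and an O(k) list-membership test; B makes a single row-major pass that updates all columns simultaneously, keeping per column an ordered list plus a seen-set, then reads the result off the final state.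
import Mathlib
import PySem

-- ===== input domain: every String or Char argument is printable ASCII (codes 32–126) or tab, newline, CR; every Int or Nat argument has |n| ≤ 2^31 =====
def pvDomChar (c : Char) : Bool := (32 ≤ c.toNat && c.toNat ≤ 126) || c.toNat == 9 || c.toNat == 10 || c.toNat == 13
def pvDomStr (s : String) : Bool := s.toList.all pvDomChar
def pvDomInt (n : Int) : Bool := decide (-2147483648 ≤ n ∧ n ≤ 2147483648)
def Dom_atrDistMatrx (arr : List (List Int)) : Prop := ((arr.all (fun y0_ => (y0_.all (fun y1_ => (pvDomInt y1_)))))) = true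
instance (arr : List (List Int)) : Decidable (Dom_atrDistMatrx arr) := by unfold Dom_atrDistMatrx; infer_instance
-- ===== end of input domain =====

-- B replaces A's column-at-a-time nested scans by a single row-major pass that updates
-- all columns simultaneously (ordered list + seen-set per column); objective: alternative.

-- ===== PORT A =====
-- column loop: for x in range(len(arr[0])): row loop: for y in range(len(arr)): dedup by list membership
def atrDistMatrx (arr : List (List Int)) : List (Int × List Int) :=
  ((PySem.List.pyRange 0 ((arr.headD []).length : Int) 1).foldl
    (fun valores x =>
      let aux : List Int :=
        (PySem.List.pyRange 0 ((arr.length : Int)) 1).foldl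
          (fun aux y =>
            if PySem.List.pyGetD (PySem.List.pyGetD arr y []) x 0 ∉ aux then
              aux ++ [PySem.List.pyGetD (PySem.List.pyGetD arr y []) x 0]
            else aux) ([] : List Int)
      valores.insert x aux)
    (PySem.Dict.empty : PySem.Dict Int (List Int))).items

-- ===== PORT B =====
def atrDistMatrx_alt (arr : List (List Int)) : List (Int × List Int) :=
  let ncols : Int := ((arr.headD []).length : Int)
  let idx := PySem.List.pyRange 0 ncols 1
  let state : List (List Int × PySem.Set Int) :=
    arr.foldl
      (fun st row =>
        (st.zip (idx.map (fun x => PySem.List.pyGetD row x 0))).map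
          (fun p =>
            if PySem.Set.contains p.1.2 p.2 then p.1
            else (p.1.1 ++ [p.2], PySem.Set.add p.1.2 p.2)))
      (idx.map (fun _ => (([] : List Int), ([] : PySem.Set Int))))
  -- dict comprehension keyed by the distinct indices of range(ncols): its items in insertion order
  idx.map (fun x => (x, (PySem.List.pyGetD state x ([], [])).1))

-- ===== PRECONDITION & SPEC =====
-- Pre_ excludes exactly the inputs where Python A raises IndexError: the empty matrix (arr[0])
-- and ragged matrices with a row shorter than the first row (arr[y][x]); B raises there too.
def Pre_atrDistMatrx (arr : List (List Int)) : Prop :=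
  arr ≠ [] ∧ ∀ row ∈ arr, (arr.headD []).length ≤ row.length
instance (arr : List (List Int)) : Decidable (Pre_atrDistMatrx arr) := by
  unfold Pre_atrDistMatrx; infer_instance
def pvWitness_atrDistMatrx : List (List Int) := [[1, 2, 1], [2, 2, 1]]

def Spec_atrDistMatrx (arr : List (List Int)) (out : List (Int × List Int)) : Prop := out = atrDistMatrx_alt arr
instance (arr : List (List Int)) (out : List (Int × List Int)) : Decidable (Spec_atrDistMatrx arr out) := by unfold Spec_atrDistMatrx; infer_instance

-- ===== CLAIM (what is proved, stated in full; the proofs are below) =====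
def Claim_equal_atrDistMatrx : Prop := ∀ (arr : List (List Int)), Dom_atrDistMatrx arr → Pre_atrDistMatrx arr → Spec_atrDistMatrx arr (atrDistMatrx arr)

-- ===== LEMMAS AND PROOFS =====

-- the deduplicated values of column x, scanning the rows in order (the common denotation)
def pvCol (arr : List (List Int)) (x : Int) : List Int :=
  arr.foldl
    (fun aux row =>
      if PySem.List.pyGetD row x 0 ∉ aux then aux ++ [PySem.List.pyGetD row x 0] else aux)
    []

lemma atrDistMatrx_eq_map (arr : List (List Int)) :
    atrDistMatrx arr =
      (PySem.List.pyRange 0 ((arr.headD []).length : Int) 1).map (fun x => (x, pvCol arr x)) := by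
  have h1 : ∀ x : Int,
      (PySem.List.pyRange 0 ((arr.length : Int)) 1).foldl
          (fun aux y =>
            if PySem.List.pyGetD (PySem.List.pyGetD arr y []) x 0 ∉ aux then
              aux ++ [PySem.List.pyGetD (PySem.List.pyGetD arr y []) x 0]
            else aux) ([] : List Int) = pvCol arr x := by
    intro x
    exact PySem.List.foldl_pyRange_zero_pyGetD' (f := fun aux row =>
      if PySem.List.pyGetD row x 0 ∉ aux then aux ++ [PySem.List.pyGetD row x 0] else aux) ..
  unfold atrDistMatrx
  simp only [h1]
  rw [PySem.Dict.items_foldl_insert_fresh (k := fun x => x) (v := fun x => pvCol arr x)]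
  · rfl
  · intro a _; exact PySem.Dict.contains_empty a
  · simpa using PySem.List.nodup_pyRange_one 0 _

lemma alt_state (idx : List Int) (rs : List (List Int)) (c : Int → List Int) :
    rs.foldl
      (fun st row =>
        (st.zip (idx.map (fun x => PySem.List.pyGetD row x 0))).map
          (fun p =>
            if PySem.Set.contains p.1.2 p.2 then p.1
            else (p.1.1 ++ [p.2], PySem.Set.add p.1.2 p.2)))
      (idx.map (fun x => (c x, PySem.Set.ofList (c x)))) =
    idx.map (fun x =>
      (rs.foldl (fun aux row => if PySem.List.pyGetD row x 0 ∉ aux then aux ++ [PySem.List.pyGetD row x 0] else aux) (c x),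
       PySem.Set.ofList
         (rs.foldl (fun aux row => if PySem.List.pyGetD row x 0 ∉ aux then aux ++ [PySem.List.pyGetD row x 0] else aux) (c x)))) := by
  induction rs generalizing c with
  | nil => simp
  | cons r rs ih =>
    simp only [List.foldl_cons]
    have hstep :
        ((idx.map (fun x => (c x, PySem.Set.ofList (c x)))).zip
            (idx.map (fun x => PySem.List.pyGetD r x 0))).map
          (fun p =>
            if PySem.Set.contains p.1.2 p.2 then p.1
            else (p.1.1 ++ [p.2], PySem.Set.add p.1.2 p.2)) =
        idx.map (fun x =>
          ((if PySem.List.pyGetD r x 0 ∉ c x then c x ++ [PySem.List.pyGetD r x 0] else c x),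
           PySem.Set.ofList (if PySem.List.pyGetD r x 0 ∉ c x then c x ++ [PySem.List.pyGetD r x 0] else c x))) := by
      rw [List.zip_map']
      rw [List.map_map]
      refine List.map_congr_left ?_
      intro x _
      simp only [Function.comp]
      by_cases h : PySem.List.pyGetD r x 0 ∈ c x
      · simp [h, PySem.Set.contains, PySem.Set.mem_ofList]
      · have hof : PySem.Set.ofList (c x ++ [PySem.List.pyGetD r x 0]) =
            (PySem.Set.ofList (c x)).add (PySem.List.pyGetD r x 0) := by
          rw [PySem.Set.ofList_eq_foldl, List.foldl_append, ← PySem.Set.ofList_eq_foldl]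
          rfl
        simp [h, PySem.Set.contains, PySem.Set.mem_ofList, hof]
    rw [hstep, ih (fun x => if PySem.List.pyGetD r x 0 ∉ c x then c x ++ [PySem.List.pyGetD r x 0] else c x)]

lemma atrDistMatrx_alt_eq_map (arr : List (List Int)) :
    atrDistMatrx_alt arr =
      (PySem.List.pyRange 0 ((arr.headD []).length : Int) 1).map (fun x => (x, pvCol arr x)) := by
  unfold atrDistMatrx_alt
  simp only []
  rw [show (fun (_ : Int) => (([] : List Int), ([] : PySem.Set Int)))
      = (fun x => ((fun _ => ([] : List Int)) x, PySem.Set.ofList ((fun _ => ([] : List Int)) x))) from rfl]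
  rw [alt_state]
  refine List.map_congr_left ?_
  intro x hx
  have h := PySem.List.mem_pyRange_one.1 hx
  rw [PySem.List.pyGetD_map_pyRange_of_nonneg _ _ _ _ h.1 h.2]
  rfl

-- ===== VERDICT (by name: the statement is the Claim_ definition above) =====
theorem atrDistMatrx_spec : Claim_equal_atrDistMatrx := by
  intro arr _ _
  unfold Spec_atrDistMatrx
  rw [atrDistMatrx_eq_map, atrDistMatrx_alt_eq_map]
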